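-- pv_equiv track=rewrite | github.com/miliar/Code_Jam_Webscraper | Solutions_python/Problem_97/1453.py | isRecycled
-- ===== SOURCE A (Python) =====
-- def isRecycled(n, m):
-- 	n = list(n)
-- 	m = list(m)
-- 	result = False
-- 	i = 1
-- 	while i < len(n) and not result:
-- 		 m.insert(0, m.pop())
-- 		 result = n == m and True
-- 		 i += 1
-- 	return result
-- ===== SOURCE B (Python) =====
-- def isRecycled(n, m):
--     if len(n) != len(m) or not n:
--         return False
--     return n in (m + m)[1:-1]
-- ===== Notes on version B (the rewrite author's own statement) =====
-- stated objective: faster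
-- what changed: Replaced the explicit pop/insert rotation loop (len(n)-1 rotations, each rebuilding and comparing a rotated copy of m) by a length guard plus a single substring search of n in the doubled string (m + m)[1:-1].
import Mathlib
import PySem

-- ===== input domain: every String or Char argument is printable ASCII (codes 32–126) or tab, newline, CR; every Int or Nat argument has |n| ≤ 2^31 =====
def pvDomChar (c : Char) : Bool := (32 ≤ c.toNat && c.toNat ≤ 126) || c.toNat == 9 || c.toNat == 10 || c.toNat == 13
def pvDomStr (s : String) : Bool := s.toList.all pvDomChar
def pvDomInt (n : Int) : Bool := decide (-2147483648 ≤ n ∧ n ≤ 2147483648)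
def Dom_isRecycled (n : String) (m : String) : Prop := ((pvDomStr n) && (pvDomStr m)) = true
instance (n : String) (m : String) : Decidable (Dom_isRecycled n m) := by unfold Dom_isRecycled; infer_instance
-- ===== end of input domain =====

-- B replaces A's pop/insert rotation loop (one rotated copy of m built and compared per
-- shift) by a length guard plus one substring search in the doubled string: n in (m+m)[1:-1].

-- ===== PORT A =====
-- m.insert(0, m.pop()) — pop the last element and reinsert it at the front
def pyRotStep (m : List Char) : List Char :=
  match PySem.List.pop? m with
  | some (x, rest) => PySem.List.insert rest 0 x
  | none => m   -- Python raises IndexError here (m empty); excluded by Pre_isRecycled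

-- the while loop: one step per remaining value of i (i runs from 1 while i < len(n))
def isRecycledGo (n : List Char) : Nat → List Char → Bool → Bool
  | 0, _, result => result
  | k+1, m, result =>
    if result then result
    else
      let m' := pyRotStep m
      isRecycledGo n k m' (n == m')

def isRecycled (n : String) (m : String) : Bool :=
  isRecycledGo n.toList (n.toList.length - 1) m.toList false

-- ===== PORT B =====
def isRecycled_alt (n : String) (m : String) : Bool :=
  if n.toList.length ≠ m.toList.length ∨ n.toList = [] then false
  else PySem.Chars.isIn n.toList
    (PySem.List.slice (m.toList ++ m.toList) (some 1) (some (-1)))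

-- ===== PRECONDITION & SPEC =====
-- Pre_ excludes exactly the inputs where A raises IndexError: len(n) >= 2 with m empty
-- (the loop body then does m.pop() on an empty list).
def Pre_isRecycled (n : String) (m : String) : Prop :=
  n.toList.length < 2 ∨ m.toList ≠ []
instance (n : String) (m : String) : Decidable (Pre_isRecycled n m) := by
  unfold Pre_isRecycled; infer_instance

def pvWitness_isRecycled : String × String := ("12", "21")

def Spec_isRecycled (n : String) (m : String) (out : Bool) : Prop := out = isRecycled_alt n m
instance (n : String) (m : String) (out : Bool) : Decidable (Spec_isRecycled n m out) := by
  unfold Spec_isRecycled; infer_instance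

-- ===== CLAIM (what is proved, stated in full; the proofs are below) =====
def Claim_equal_isRecycled : Prop := ∀ (n : String) (m : String), Dom_isRecycled n m → Pre_isRecycled n m → Spec_isRecycled n m (isRecycled n m)

-- ===== LEMMAS AND PROOFS =====

theorem rotStep_append (ys : List Char) (y : Char) : pyRotStep (ys ++ [y]) = y :: ys := by
  simp [pyRotStep, PySem.List.pop?_last, PySem.List.insert_zero]

theorem length_rotStep (m : List Char) (h : m ≠ []) : (pyRotStep m).length = m.length := by
  obtain ⟨ys, y, rfl⟩ := m.eq_nil_or_concat.resolve_left h
  simp [rotStep_append]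

theorem rotStep_ne_nil (m : List Char) (h : m ≠ []) : pyRotStep m ≠ [] := by
  intro hc
  have := length_rotStep m h
  rw [hc] at this
  simp at this
  exact h (List.eq_nil_of_length_eq_zero this.symm)

theorem length_rotIter (m : List Char) (h : m ≠ []) (k : Nat) :
    (pyRotStep^[k] m).length = m.length ∧ pyRotStep^[k] m ≠ [] := by
  induction k with
  | zero => exact ⟨rfl, h⟩
  | succ k ih =>
    rw [Function.iterate_succ_apply']
    exact ⟨(length_rotStep _ ih.2).trans ih.1, rotStep_ne_nil _ ih.2⟩

theorem rotIter_eq (m : List Char) (k : Nat) (hk : k ≤ m.length) :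
    pyRotStep^[k] m = m.drop (m.length - k) ++ m.take (m.length - k) := by
  induction k with
  | zero => simp
  | succ k ih =>
    have hk' : k ≤ m.length := by omega
    rw [Function.iterate_succ_apply', ih hk']
    have h1 : m.length - k = (m.length - (k+1)) + 1 := by omega
    have h2 : m.length - (k+1) < m.length := by omega
    rw [h1, List.take_add_one]
    have h3 : m[m.length - (k+1)]?.toList = [m[m.length - (k+1)]'h2] := by
      simp [List.getElem?_eq_getElem h2]
    rw [h3, ← List.append_assoc, rotStep_append, ← List.cons_append,
      ← List.drop_eq_getElem_cons h2]

theorem go_eq (N : List Char) (k : Nat) (M : List Char) (result : Bool) (h : M ≠ []) :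
    isRecycledGo N k M result
      = (result || (List.range k).any (fun j => N == pyRotStep^[j+1] M)) := by
  induction k generalizing M result with
  | zero => simp [isRecycledGo]
  | succ k ih =>
    rw [isRecycledGo]
    cases result with
    | true => simp
    | false =>
      rw [if_neg (by simp)]
      rw [ih _ _ (rotStep_ne_nil M h)]
      rw [List.range_succ_eq_map]
      simp only [List.any_cons, List.any_map, Bool.false_or, zero_add, Function.iterate_one]
      have hcg : (List.range k).any ((fun j => N == pyRotStep^[j+1] M) ∘ Nat.succ)
          = (List.range k).any (fun j => N == pyRotStep^[j+1] (pyRotStep M)) := by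
        apply PySem.List.any_congr_mem
        intro j hj
        simp only [Function.comp_apply, Nat.succ_eq_add_one]
        rw [Function.iterate_succ_apply]
      rw [hcg]

theorem drop_take_double (M : List Char) (i : Nat) (hi : i ≤ M.length) :
    ((M ++ M).drop i).take M.length = M.drop i ++ M.take i := by
  rw [List.drop_append, Nat.sub_eq_zero_of_le hi, List.drop_zero, List.take_append,
    List.take_of_length_le (by simp), List.length_drop]
  congr 2
  omega

theorem slice_one_negone (xs : List Char) :
    PySem.List.slice xs (some 1) (some (-1)) = (xs.drop 1).take (xs.length - 2) := by
  cases xs with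
  | nil => rfl
  | cons x t =>
    simp only [PySem.List.slice, Int.reduceNeg, Order.lt_one_iff,
      PySem.List.clampIdx_neg_ofNat, zero_le_one, PySem.List.clampIdx_of_nonneg,
      Int.toNat_one, List.drop_one]
    have h1 : min 1 (x :: t).length = 1 := by simp
    rw [h1]
    simp only [List.length_cons, List.drop_one]
    congr 1

theorem A_iff (N M : List Char) (hM : M ≠ []) (hL : N.length = M.length) :
    isRecycledGo N (N.length - 1) M false = true ↔
    ∃ i, 1 ≤ i ∧ i < M.length ∧ N = M.drop i ++ M.take i := by
  rw [go_eq N _ M false hM]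
  simp only [Bool.false_or, List.any_eq_true, List.mem_range, beq_iff_eq]
  constructor
  · rintro ⟨j, hj, hN⟩
    refine ⟨M.length - (j+1), by omega, by omega, ?_⟩
    rw [hN]
    exact rotIter_eq M (j+1) (by omega)
  · rintro ⟨i, h1, h2, hN⟩
    refine ⟨M.length - 1 - i, by omega, ?_⟩
    rw [hN, rotIter_eq M (M.length - 1 - i + 1) (by omega)]
    have h3 : M.length - (M.length - 1 - i + 1) = i := by omega
    rw [h3]

theorem B_iff (N M : List Char) (hL : N.length = M.length) (hN : N ≠ []) :
    PySem.Chars.isIn N (PySem.List.slice (M ++ M) (some 1) (some (-1))) = true ↔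
    ∃ i, 1 ≤ i ∧ i < M.length ∧ N = M.drop i ++ M.take i := by
  rw [← PySem.Chars.exists_prefix_drop_iff_isIn, slice_one_negone]
  have hlen : (M ++ M).length = 2 * M.length := by simp; omega
  have hMpos : 1 ≤ M.length := by
    rcases Nat.eq_zero_or_pos M.length with h | h
    · exfalso; apply hN; apply List.eq_nil_of_length_eq_zero; omega
    · omega
  constructor
  · rintro ⟨j, hp⟩
    rw [List.prefix_iff_eq_take] at hp
    rw [List.drop_take, List.drop_drop, List.take_take] at hp
    by_cases hj : j + 2 ≤ M.length
    · refine ⟨j + 1, by omega, by omega, ?_⟩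
      have hmin : min N.length ((M ++ M).length - 2 - j) = M.length := by omega
      rw [hmin] at hp
      have : j + 1 = 1 + j := by omega
      rw [hp, this, drop_take_double M (1 + j) (by omega)]
    · exfalso
      have := congrArg List.length hp
      simp only [List.length_take, List.length_drop] at this
      omega
  · rintro ⟨i, h1, h2, hN'⟩
    refine ⟨i - 1, ?_⟩
    rw [List.prefix_iff_eq_take, List.drop_take, List.drop_drop, List.take_take]
    have h3 : 1 + (i - 1) = i := by omega
    have hmin : min N.length ((M ++ M).length - 2 - (i - 1)) = M.length := by omega
    rw [h3, hmin, drop_take_double M i (by omega)]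
    exact hN'

theorem key (N M : List Char) (h2 : 2 ≤ N.length → M ≠ []) :
    isRecycledGo N (N.length - 1) M false =
      (if N.length ≠ M.length ∨ N = [] then false
       else PySem.Chars.isIn N (PySem.List.slice (M ++ M) (some 1) (some (-1)))) := by
  by_cases hM : M = []
  · subst hM
    have hN : N.length ≤ 1 := by
      by_contra h
      exact (h2 (by omega)) rfl
    have h0 : N.length - 1 = 0 := by omega
    rw [h0]
    rw [if_pos ?_]
    · rfl
    · rcases N with _ | ⟨a, t⟩
      · exact Or.inr rfl
      · left; simp
  · by_cases hL : N.length = M.length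
    · have hN : N ≠ [] := by
        intro h
        apply hM
        apply List.eq_nil_of_length_eq_zero
        rw [← hL, h]
        rfl
      rw [if_neg (by simp [hL, hN])]
      rw [Bool.eq_iff_iff, A_iff N M hM hL, B_iff N M hL hN]
    · rw [if_pos (Or.inl hL)]
      rw [go_eq N _ M false hM]
      simp only [Bool.false_or, List.any_eq_false, List.mem_range, beq_iff_eq]
      intro j hj heq
      have := (length_rotIter M hM (j+1)).1
      rw [← heq] at this
      exact hL this

-- ===== VERDICT (by name: the statement is the Claim_ definition above) =====
theorem isRecycled_spec : Claim_equal_isRecycled := by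
  intro n m _ hpre
  unfold Spec_isRecycled isRecycled isRecycled_alt
  apply key
  intro hlen
  rcases hpre with h | h
  · exact absurd hlen (by omega)
  · exact h
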